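-- pv_equiv track=rewrite | github.com/wienerjon/Futoshiki-Puzzle-Solver | sourceCode.py | getBestHeuristic
-- ===== SOURCE A (Python) =====
-- def mostConstrained(values, i, j): # returns the amount that a variable is constrained
--     domain = [1,2,3,4,5]
--     for k in range(5):
--         if k != i and values[k][j] != 0:
--             try:
--                 domain.remove(values[k][j])
--             except:
--                 pass
--         if k != j and values[i][k] != 0:
--             try:
--                 domain.remove(values[i][k])
--             except:
--                 pass
--     return len(domain) # returns the about of possible values
--
-- def mostConstraining(values, i, j): # finds the amount of variables constrained by location (i, j)
--     res = 0
--     for k in range(5):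
--         if k != i and values[k][j] == 0:
--             res += 1
--         if k != j and values[i][k] == 0:
--             res += 1
--     return res
--
-- def getBestHeuristic(values): # finds the variable with the best heuristic
--     # finds most constrained
--     remaining = 6
--     best = ([], remaining)
--     for i in range(5):
--         for j in range(5):
--             if values[i][j] == 0:
--                 amtConstrained = mostConstrained(values, i, j)
--                 if (amtConstrained == best[1]):
--                     best[0].append((i, j))
--                 elif amtConstrained < best[1]:
--                     best = ([(i, j)], amtConstrained)
--     #TODO
--     # if there is no tie, return the most constrained variable
--     if len(best[0]) == 1:
--         return best[0][0]
--
--     # else, find the most constraining variable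
--
--     # most constraining
--     ties = best[0]
--     mostConstaining = (None, -1)
--     for location in ties:
--         (i, j) = location
--         currConstaints = mostConstraining(values, i, j)
--         if currConstaints > mostConstaining[1]:
--             mostConstaining = (location, currConstaints)
--
--     return mostConstaining[0]
-- ===== SOURCE B (Python) =====
-- def getBestHeuristic(values):  # one pass: running best cell under key (mrv, -constraining)
--     best = None
--     bestKey = None
--     for i in range(5):
--         for j in range(5):
--             if values[i][j] != 0:
--                 continue
--             nbr = [values[k][j] for k in range(5) if k != i] \
--                 + [values[i][k] for k in range(5) if k != j]
--             mrv = sum(1 for d in range(1, 6) if d not in nbr)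
--             key = (mrv, -nbr.count(0))
--             if bestKey is None or key < bestKey:
--                 best, bestKey = (i, j), key
--     return best
-- ===== Notes on version B (the rewrite author's own statement) =====
-- stated objective: simpler
-- what changed: B replaces A's remove-from-domain loops, tie-list accumulation and separate most-constraining second pass by a single row-major pass that scores each empty cell once with the key (domain-remaining count computed by distinct-membership counting, negated constraining count) and keeps one running best cell under strict lexicographic comparison.
import Mathlib
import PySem

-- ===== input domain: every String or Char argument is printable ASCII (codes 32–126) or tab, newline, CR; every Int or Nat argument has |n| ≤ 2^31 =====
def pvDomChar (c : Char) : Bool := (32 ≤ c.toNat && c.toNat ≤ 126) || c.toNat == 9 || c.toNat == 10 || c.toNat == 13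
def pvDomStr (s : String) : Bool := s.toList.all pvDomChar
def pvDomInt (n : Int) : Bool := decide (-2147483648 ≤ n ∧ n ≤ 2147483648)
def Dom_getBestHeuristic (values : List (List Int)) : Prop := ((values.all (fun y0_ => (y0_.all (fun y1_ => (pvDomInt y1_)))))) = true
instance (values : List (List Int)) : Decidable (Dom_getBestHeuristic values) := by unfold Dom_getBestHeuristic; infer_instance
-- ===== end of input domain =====

-- B replaces A's tie-list + second most-constraining pass by a single row-major pass keeping one
-- running best cell under the key (most-constrained count, -most-constraining count); objective: simpler.

-- total accessor for values[i][j]; exact (= Python's indexing) whenever Pre_getBestHeuristic holds,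
-- since both loops only use indices 0..4
def cellAt (values : List (List Int)) (i j : Int) : Int :=
  (PySem.List.pyGet? ((PySem.List.pyGet? values i).getD []) j).getD 0

-- ===== PORT A =====
def mostConstrained (values : List (List Int)) (i j : Int) : Int :=
  let dom := (PySem.List.pyRange 0 5 1).foldl (fun dom k =>
    let dom := if k ≠ i ∧ cellAt values k j ≠ 0 then
                 (PySem.List.remove? dom (cellAt values k j)).getD dom else dom
    if k ≠ j ∧ cellAt values i k ≠ 0 then
      (PySem.List.remove? dom (cellAt values i k)).getD dom else dom) [1,2,3,4,5]
  (dom.length : Int)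

def mostConstraining (values : List (List Int)) (i j : Int) : Int :=
  (PySem.List.pyRange 0 5 1).foldl (fun r k =>
    let r := if k ≠ i ∧ cellAt values k j = 0 then r + 1 else r
    if k ≠ j ∧ cellAt values i k = 0 then r + 1 else r) 0

def getBestHeuristic (values : List (List Int)) : Option (Int × Int) :=
  let best : List (Int × Int) × Int := ([], 6)
  let best := (PySem.List.pyRange 0 5 1).foldl (fun best i =>
    (PySem.List.pyRange 0 5 1).foldl (fun best j =>
      if cellAt values i j = 0 then
        let a := mostConstrained values i j
        if a = best.2 then (best.1 ++ [(i, j)], best.2)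
        else if a < best.2 then ([(i, j)], a)
        else best
      else best) best) best
  if best.1.length = 1 then PySem.List.pyGet? best.1 0
  else
    let mc := best.1.foldl (fun (mc : Option (Int × Int) × Int) loc =>
      if mostConstraining values loc.1 loc.2 > mc.2 then
        (some loc, mostConstraining values loc.1 loc.2)
      else mc) (none, -1)
    mc.1

-- ===== PORT B =====
def nbrList (values : List (List Int)) (i j : Int) : List Int :=
  ((PySem.List.pyRange 0 5 1).filter (fun k => k ≠ i)).map (fun k => cellAt values k j)
  ++ ((PySem.List.pyRange 0 5 1).filter (fun k => k ≠ j)).map (fun k => cellAt values i k)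

def cellKey (values : List (List Int)) (i j : Int) : Int × Int :=
  let nbr := nbrList values i j
  let mrv : Int := (PySem.List.pyRange 1 6 1).foldl (fun s d => if d ∈ nbr then s else s + 1) 0
  (mrv, -(nbr.count 0 : Int))

def keyLt (p q : Int × Int) : Bool := p.1 < q.1 || (p.1 == q.1 && p.2 < q.2)

def getBestHeuristic_alt (values : List (List Int)) : Option (Int × Int) :=
  let best := (PySem.List.pyRange 0 5 1).foldl (fun (best : Option ((Int × Int) × (Int × Int))) i =>
    (PySem.List.pyRange 0 5 1).foldl (fun best j =>
      if cellAt values i j ≠ 0 then best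
      else
        let key := cellKey values i j
        match best with
        | none => some ((i, j), key)
        | some (_, bk) => if keyLt key bk then some ((i, j), key) else best) best) none
  best.map Prod.fst

-- ===== PRECONDITION & SPEC =====
-- Pre_ excludes exactly the inputs where Python A raises IndexError: the grid must have at least
-- 5 rows whose first 5 each have at least 5 entries (A reads values[i][j] for all i,j in 0..4).
def Pre_getBestHeuristic (values : List (List Int)) : Prop :=
  5 ≤ values.length ∧ ∀ r ∈ values.take 5, 5 ≤ r.length
instance (values : List (List Int)) : Decidable (Pre_getBestHeuristic values) := by
  unfold Pre_getBestHeuristic; infer_instance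

def pvWitness_getBestHeuristic : List (List Int) :=
  [[1,2,3,4,5],[0,0,0,0,0],[5,4,3,2,1],[0,0,0,0,0],[1,1,1,1,1]]

def Spec_getBestHeuristic (values : List (List Int)) (out : Option (Int × Int)) : Prop := out = getBestHeuristic_alt values
instance (values : List (List Int)) (out : Option (Int × Int)) : Decidable (Spec_getBestHeuristic values out) := by unfold Spec_getBestHeuristic; infer_instance

-- ===== CLAIM (what is proved, stated in full; the proofs are below) =====
def Claim_equal_getBestHeuristic : Prop := ∀ (values : List (List Int)), Dom_getBestHeuristic values → Pre_getBestHeuristic values → Spec_getBestHeuristic values (getBestHeuristic values)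

-- ===== LEMMAS AND PROOFS =====

-- remove-with-ignored-failure loop: one step
def rmv (dom : List Int) (v : Int) : List Int := (PySem.List.remove? dom v).getD dom

-- the sequence of values A's k-th inner iteration tries to remove from the domain
def ops (values : List (List Int)) (i j k : Int) : List Int :=
  (if k ≠ i ∧ cellAt values k j ≠ 0 then [cellAt values k j] else [])
  ++ (if k ≠ j ∧ cellAt values i k ≠ 0 then [cellAt values i k] else [])

lemma foldl_rmv_eq_filter (vs : List Int) : ∀ (base : List Int), base.Nodup →
    List.foldl rmv base vs = base.filter (fun d => decide (d ∉ vs)) := by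
  induction vs with
  | nil => intro base _; simp
  | cons v vs ih =>
    intro base hnd
    by_cases hv : v ∈ base
    · rw [List.foldl_cons, show rmv base v = base.erase v by
          simp [rmv, PySem.List.remove?_eq_some_erase base v hv],
        ih _ (hnd.erase v), hnd.erase_eq_filter v, List.filter_filter]
      apply List.filter_congr
      intro d _
      by_cases hdv : d = v <;> by_cases hdvs : d ∈ vs <;> simp [hdv, hdvs]
    · rw [List.foldl_cons, show rmv base v = base by
          simp [rmv, (PySem.List.remove?_eq_none_iff base v).mpr hv],
        ih _ hnd]
      apply List.filter_congr
      intro d hd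
      have hdv : d ≠ v := fun h => hv (h ▸ hd)
      by_cases hdvs : d ∈ vs <;> simp [hdv, hdvs]

lemma mem_ops_iff (values : List (List Int)) (i j k d : Int) :
    d ∈ ops values i j k ↔
      (k ≠ i ∧ cellAt values k j ≠ 0 ∧ d = cellAt values k j)
      ∨ (k ≠ j ∧ cellAt values i k ≠ 0 ∧ d = cellAt values i k) := by
  unfold ops
  split_ifs with h1 h2 h2 <;> simp [h1, h2] <;> tauto

lemma mem_flatMap_ops_iff (values : List (List Int)) (i j d : Int) (hd : d ≠ 0) :
    d ∈ (PySem.List.pyRange 0 5 1).flatMap (ops values i j) ↔ d ∈ nbrList values i j := by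
  simp only [List.mem_flatMap, nbrList, List.mem_append, List.mem_map, List.mem_filter]
  constructor
  · rintro ⟨k, hk, hops⟩
    rcases (mem_ops_iff values i j k d).mp hops with ⟨h1, _, h3⟩ | ⟨h1, _, h3⟩
    · exact Or.inl ⟨k, ⟨hk, by simpa using h1⟩, h3.symm⟩
    · exact Or.inr ⟨k, ⟨hk, by simpa using h1⟩, h3.symm⟩
  · rintro (⟨k, ⟨hk, h1⟩, h2⟩ | ⟨k, ⟨hk, h1⟩, h2⟩)
    · exact ⟨k, hk, (mem_ops_iff values i j k d).mpr (Or.inl ⟨by simpa using h1, h2 ▸ hd, h2.symm⟩)⟩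
    · exact ⟨k, hk, (mem_ops_iff values i j k d).mpr (Or.inr ⟨by simpa using h1, h2 ▸ hd, h2.symm⟩)⟩

lemma mostConstrained_eq_filter (values : List (List Int)) (i j : Int) :
    mostConstrained values i j =
      (([1,2,3,4,5].filter (fun d =>
        decide (d ∉ (PySem.List.pyRange 0 5 1).flatMap (ops values i j)))).length : Int) := by
  simp only [mostConstrained]
  rw [PySem.List.foldl_congr_mem _ _ (fun dom k => (ops values i j k).foldl rmv dom) _
      (by intro dom k _
          simp only [ops]
          by_cases h1 : k ≠ i ∧ cellAt values k j ≠ 0 <;>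
            by_cases h2 : k ≠ j ∧ cellAt values i k ≠ 0 <;>
            simp [h1, h2, rmv]),
    ← List.foldl_flatMap, foldl_rmv_eq_filter _ _ (by decide)]

lemma mostConstrained_le (values : List (List Int)) (i j : Int) :
    mostConstrained values i j ≤ 5 := by
  rw [mostConstrained_eq_filter]
  have h := List.length_filter_le (fun d =>
    decide (d ∉ (PySem.List.pyRange 0 5 1).flatMap (ops values i j))) [1,2,3,4,5]
  simp only [List.length_cons, List.length_nil] at h
  exact_mod_cast h

-- the interleaved two-indicator loop of mostConstraining (specific shape; not in the library)
lemma foldl_two_ite (p q : Int → Prop) [DecidablePred p] [DecidablePred q]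
    (l : List Int) : ∀ (a : Int),
    l.foldl (fun r k => if q k then (if p k then r + 1 else r) + 1
                        else (if p k then r + 1 else r)) a
      = a + (l.countP (fun k => decide (p k)) : Int) + (l.countP (fun k => decide (q k)) : Int) := by
  induction l with
  | nil => intro a; simp
  | cons x l ih =>
    intro a
    rw [List.foldl_cons, ih, List.countP_cons, List.countP_cons]
    split_ifs <;> simp_all <;> omega

lemma mostConstraining_eq_count (values : List (List Int)) (i j : Int) :
    mostConstraining values i j = ((nbrList values i j).count 0 : Int) := by
  simp only [mostConstraining, nbrList]
  rw [foldl_two_ite (fun k => k ≠ i ∧ cellAt values k j = 0)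
      (fun k => k ≠ j ∧ cellAt values i k = 0)]
  rw [List.count_append, List.count_eq_countP, List.count_eq_countP,
    List.countP_map, List.countP_map, List.countP_filter, List.countP_filter]
  rw [zero_add]
  push_cast
  congr 1 <;> rw [Nat.cast_inj]
  · apply List.countP_congr
    intro k _
    by_cases h1 : k = i <;> by_cases h2 : cellAt values k j = 0 <;>
      simp [h1, h2, Function.comp]
  · apply List.countP_congr
    intro k _
    by_cases h1 : k = j <;> by_cases h2 : cellAt values i k = 0 <;>
      simp [h1, h2, Function.comp]

lemma mostConstraining_nonneg (values : List (List Int)) (i j : Int) :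
    0 ≤ mostConstraining values i j := by
  rw [mostConstraining_eq_count]; positivity

lemma cellKey_eq (values : List (List Int)) (i j : Int) :
    cellKey values i j = (mostConstrained values i j, -(mostConstraining values i j)) := by
  simp only [cellKey]
  rw [mostConstraining_eq_count, mostConstrained_eq_filter]
  congr 1
  rw [PySem.List.foldl_congr_mem _ _ (fun s d =>
      if d ∉ nbrList values i j then s + 1 else s) _
      (by intro s d _; by_cases h : d ∈ nbrList values i j <;> simp [h]),
    PySem.List.foldl_ite_add_one, List.countP_eq_length_filter,
    show PySem.List.pyRange 1 6 1 = [1,2,3,4,5] by decide]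
  rw [zero_add, Nat.cast_inj]
  congr 1
  apply List.filter_congr
  intro d hdm
  have hd : d ≠ 0 := by fin_cases hdm <;> decide
  simp [mem_flatMap_ops_iff values i j d hd]

-- per-cell steps of the two main loops, and A's final most-constraining pass
def FA (values : List (List Int)) (best : List (Int × Int) × Int) (p : Int × Int) :
    List (Int × Int) × Int :=
  if cellAt values p.1 p.2 = 0 then
    let a := mostConstrained values p.1 p.2
    if a = best.2 then (best.1 ++ [p], best.2)
    else if a < best.2 then ([p], a)
    else best
  else best

def FB (values : List (List Int)) (best : Option ((Int × Int) × (Int × Int))) (p : Int × Int) :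
    Option ((Int × Int) × (Int × Int)) :=
  if cellAt values p.1 p.2 ≠ 0 then best
  else
    let key := cellKey values p.1 p.2
    match best with
    | none => some (p, key)
    | some (_, bk) => if keyLt key bk then some (p, key) else best

def resolve (values : List (List Int)) (ties : List (Int × Int)) : Option (Int × Int) × Int :=
  ties.foldl (fun (mc : Option (Int × Int) × Int) loc =>
    if mostConstraining values loc.1 loc.2 > mc.2 then
      (some loc, mostConstraining values loc.1 loc.2)
    else mc) (none, -1)

def cells : List (Int × Int) :=
  (PySem.List.pyRange 0 5 1).flatMap (fun i => (PySem.List.pyRange 0 5 1).map (fun j => (i, j)))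

lemma getA_eq (values : List (List Int)) :
    getBestHeuristic values =
      (if (cells.foldl (FA values) ([], 6)).1.length = 1 then
        PySem.List.pyGet? (cells.foldl (FA values) ([], 6)).1 0
      else (resolve values (cells.foldl (FA values) ([], 6)).1).1) := by
  simp only [getBestHeuristic, cells, resolve]
  rw [List.foldl_flatMap]
  simp only [List.foldl_map]
  rfl

lemma getB_eq (values : List (List Int)) :
    getBestHeuristic_alt values = (cells.foldl (FB values) none).map Prod.fst := by
  simp only [getBestHeuristic_alt, cells]
  rw [List.foldl_flatMap]
  simp only [List.foldl_map]
  rfl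

lemma resolve_single (values : List (List Int)) (c : Int × Int) :
    resolve values [c] = (some c, mostConstraining values c.1 c.2) := by
  unfold resolve
  simp [show ¬ mostConstraining values c.1 c.2 ≤ -1 by
    have := mostConstraining_nonneg values c.1 c.2; omega]

lemma resolve_append (values : List (List Int)) (ties : List (Int × Int)) (c : Int × Int) :
    resolve values (ties ++ [c]) =
      (if mostConstraining values c.1 c.2 > (resolve values ties).2 then
        (some c, mostConstraining values c.1 c.2)
      else resolve values ties) := by
  unfold resolve
  rw [List.foldl_append]
  simp

def InvP (values : List (List Int)) (s : List (Int × Int) × Int)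
    (t : Option ((Int × Int) × (Int × Int))) : Prop :=
  (s = ([], 6) ∧ t = none) ∨
  (∃ c, s.1 ≠ [] ∧ (∀ x ∈ s.1, mostConstrained values x.1 x.2 = s.2) ∧ s.2 ≤ 5 ∧
    resolve values s.1 = (some c, mostConstraining values c.1 c.2) ∧
    t = some (c, (s.2, -(mostConstraining values c.1 c.2))))

lemma inv_step (values : List (List Int)) (s : List (Int × Int) × Int)
    (t : Option ((Int × Int) × (Int × Int))) (p : Int × Int) (h : InvP values s t) :
    InvP values (FA values s p) (FB values t p) := by
  by_cases hc : cellAt values p.1 p.2 = 0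
  · have ha5 : mostConstrained values p.1 p.2 ≤ 5 := mostConstrained_le values p.1 p.2
    rcases h with ⟨hs, ht⟩ | ⟨c, hne, hall, hle, hres, ht⟩
    · subst hs; subst ht
      have hA : FA values ([], 6) p = ([p], mostConstrained values p.1 p.2) := by
        simp only [FA, if_pos hc]
        rw [if_neg (by omega), if_pos (by omega)]
      have hB : FB values none p
          = some (p, (mostConstrained values p.1 p.2, -(mostConstraining values p.1 p.2))) := by
        simp only [FB, hc]
        simp [cellKey_eq]
      rw [hA, hB]
      exact Or.inr ⟨p, by simp, by simp, ha5, resolve_single values p, rfl⟩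
    · subst ht
      by_cases h1 : mostConstrained values p.1 p.2 = s.2
      · have hA : FA values s p = (s.1 ++ [p], s.2) := by
          simp only [FA, if_pos hc, if_pos h1]
        by_cases h2 : mostConstraining values c.1 c.2 < mostConstraining values p.1 p.2
        · have hB : FB values (some (c, (s.2, -(mostConstraining values c.1 c.2)))) p
              = some (p, (s.2, -(mostConstraining values p.1 p.2))) := by
            simp only [FB, hc]
            simp [cellKey_eq, keyLt, h1, h2]
          rw [hA, hB]
          refine Or.inr ⟨p, by simp, ?_, hle, ?_, rfl⟩
          · intro x hx
            rcases List.mem_append.mp hx with hx | hx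
            · exact hall x hx
            · simp at hx; subst hx; exact h1
          · rw [resolve_append, hres]
            simp [h2]
        · have hB : FB values (some (c, (s.2, -(mostConstraining values c.1 c.2)))) p
              = some (c, (s.2, -(mostConstraining values c.1 c.2))) := by
            simp only [FB, hc]
            simp [cellKey_eq, keyLt, h1]
            omega
          rw [hA, hB]
          refine Or.inr ⟨c, by simp, ?_, hle, ?_, rfl⟩
          · intro x hx
            rcases List.mem_append.mp hx with hx | hx
            · exact hall x hx
            · simp at hx; subst hx; exact h1
          · rw [resolve_append, hres]
            simp [h2]
      · by_cases h2 : mostConstrained values p.1 p.2 < s.2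
        · have hA : FA values s p = ([p], mostConstrained values p.1 p.2) := by
            simp only [FA, if_pos hc, if_neg h1, if_pos h2]
          have hB : FB values (some (c, (s.2, -(mostConstraining values c.1 c.2)))) p
              = some (p, (mostConstrained values p.1 p.2, -(mostConstraining values p.1 p.2))) := by
            simp only [FB, hc]
            simp [cellKey_eq, keyLt, h2]
          rw [hA, hB]
          exact Or.inr ⟨p, by simp, by simp, ha5, resolve_single values p, rfl⟩
        · have hA : FA values s p = s := by
            simp only [FA, if_pos hc, if_neg h1, if_neg h2]
          have hB : FB values (some (c, (s.2, -(mostConstraining values c.1 c.2)))) p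
              = some (c, (s.2, -(mostConstraining values c.1 c.2))) := by
            simp only [FB, hc]
            simp [cellKey_eq, keyLt, h1, h2]
          rw [hA, hB]
          exact Or.inr ⟨c, hne, hall, hle, hres, rfl⟩
  · have hA : FA values s p = s := by simp [FA, hc]
    have hB : FB values t p = t := by simp [FB, hc]
    rw [hA, hB]
    exact h

lemma inv_foldl (values : List (List Int)) (l : List (Int × Int)) :
    ∀ s t, InvP values s t → InvP values (l.foldl (FA values) s) (l.foldl (FB values) t) := by
  induction l with
  | nil => intro s t h; exact h
  | cons p l ih => intro s t h; exact ih _ _ (inv_step values s t p h)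

lemma inv_finish (values : List (List Int)) (s : List (Int × Int) × Int)
    (t : Option ((Int × Int) × (Int × Int))) (h : InvP values s t) :
    (if s.1.length = 1 then PySem.List.pyGet? s.1 0 else (resolve values s.1).1)
      = t.map Prod.fst := by
  rcases h with ⟨hs, ht⟩ | ⟨c, hne, hall, hle, hres, ht⟩
  · subst hs; subst ht; simp [resolve]
  · subst ht
    by_cases hl : s.1.length = 1
    · obtain ⟨x, hx⟩ := List.length_eq_one_iff.mp hl
      rw [if_pos hl, hx]
      rw [hx, resolve_single] at hres
      have hcx : c = x := by
        have := congrArg Prod.fst hres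
        simpa using this.symm
      simp [hcx, PySem.List.pyGet?, PySem.List.pyIdx?]
    · rw [if_neg hl, hres]; rfl

-- ===== VERDICT (by name: the statement is the Claim_ definition above) =====
theorem getBestHeuristic_spec : Claim_equal_getBestHeuristic := by
  intro values _ _
  unfold Spec_getBestHeuristic
  rw [getA_eq, getB_eq]
  exact inv_finish values _ _ (inv_foldl values cells ([], 6) none (Or.inl ⟨rfl, rfl⟩))
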